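-- pv_equiv track=rewrite | github.com/KajaBraz/AdventOfCode2021 | day25.py | move_south
-- ===== SOURCE A (Python) =====
-- def move_south(board: [[str]], has_moved_east: bool) -> ([[str]], bool):
--     to_move = set()
--     for i in range(len(board)):
--         for j in range(len(board[0])):
--             if board[i][j] == 'v' and board[(i + 1) % len(board)][j] == '.':
--                 to_move.add((i, j))
--     new_board = [[item for item in row] for row in board]
--     has_moved = True if len(to_move) > 0 else False
--     has_moved = has_moved or has_moved_east
--     for x, y in to_move:
--         new_board[x][y] = '.'
--         new_board[(x + 1) % len(new_board)][y] = 'v'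
--
--     return new_board, has_moved
-- ===== SOURCE B (Python) =====
-- def move_south(board: [[str]], has_moved_east: bool) -> ([[str]], bool):
--     # Single pass: each output cell is computed directly from its vertical
--     # neighbours; the input board is never mutated.
--     n = len(board)
--     new_board = []
--     moved = False
--     for i, row in enumerate(board):
--         above, below = board[i - 1], board[(i + 1) % n]
--         new_row = []
--         for j, c in enumerate(row):
--             if c == 'v' and below[j] == '.':
--                 new_row.append('.')
--                 moved = True
--             elif c == '.' and above[j] == 'v':
--                 new_row.append('v')
--             else:
--                 new_row.append(c)
--         new_board.append(new_row)
--     return new_board, moved or has_moved_east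
-- ===== Notes on version B (the rewrite author's own statement) =====
-- stated objective: alternative
-- what changed: B builds the new board in a single pass computing each output cell directly from its vertical neighbours instead of A's collect-a-move-set/copy/replay; Pre_ excludes ragged boards, on which A raises IndexError (rows shorter than the first) or its leaving cells beyond column len(board[0]) untouched is an artefact of using the first row's length as the grid width (rows longer than the first).
-- outside the precondition, e.g. on move_south([['v'], ['.', 'v']], False): A returns ([['.'], ['v', 'v']], True), B raises IndexError
import Mathlib
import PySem

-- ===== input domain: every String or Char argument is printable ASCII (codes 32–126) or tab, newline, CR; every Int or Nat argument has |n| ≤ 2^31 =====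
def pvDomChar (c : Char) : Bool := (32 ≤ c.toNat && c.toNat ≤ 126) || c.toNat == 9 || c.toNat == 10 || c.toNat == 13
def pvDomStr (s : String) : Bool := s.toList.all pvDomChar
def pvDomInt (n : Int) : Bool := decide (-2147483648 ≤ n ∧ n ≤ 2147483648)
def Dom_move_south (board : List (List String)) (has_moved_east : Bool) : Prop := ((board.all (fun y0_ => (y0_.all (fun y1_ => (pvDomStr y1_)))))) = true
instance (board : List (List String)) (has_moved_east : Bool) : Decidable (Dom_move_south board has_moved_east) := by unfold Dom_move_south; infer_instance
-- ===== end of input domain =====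

-- B computes each output cell in one pass from its vertical neighbours instead of A's
-- "collect a move-set, copy the board, replay the moves" (objective: alternative
-- decomposition, same cost). Equivalence is about the return value; neither port
-- mutates its argument (the Python A mutates only its own fresh copy).

-- ===== PORT A =====
-- board[i][j] (indices in range on every input the claim admits)
def pvIdx (board : List (List String)) (i j : Int) : String :=
  PySem.List.pyGetD (PySem.List.pyGetD board i []) j ""

-- the test "board[i][j] == 'v' and board[(i+1) % len(board)][j] == '.'"
def pvSrc (board : List (List String)) (n i j : Int) : Bool :=
  (pvIdx board i j == "v") && (pvIdx board (PySem.Int.mod (i + 1) n) j == ".")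

-- body of A's replay loop: new_board[x][y] = '.'; new_board[(x+1) % len(new_board)][y] = 'v'
def pvUpd (b : List (List String)) (p : Int × Int) : List (List String) :=
  let b1 := PySem.List.pySetD b p.1 (PySem.List.pySetD (PySem.List.pyGetD b p.1 []) p.2 ".")
  let x2 : Int := PySem.Int.mod (p.1 + 1) (b1.length : Int)
  PySem.List.pySetD b1 x2 (PySem.List.pySetD (PySem.List.pyGetD b1 x2 []) p.2 "v")

def move_south (board : List (List String)) (has_moved_east : Bool) : List (List String) × Bool :=
  let n : Int := (board.length : Int)
  let w : Int := ((board.headD []).length : Int)  -- len(board[0]); Python reads it only when the loop body runs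
  let to_move : PySem.Set (Int × Int) :=
    (PySem.List.pyRange 0 n 1).foldl (fun s i =>
      (PySem.List.pyRange 0 w 1).foldl (fun s j =>
        if pvSrc board n i j then PySem.Set.add s (i, j) else s) s) PySem.Set.empty
  let new_board := board.map (fun row => row.map (fun item => item))
  let has_moved := if to_move.length > 0 then true else false
  let has_moved := has_moved || has_moved_east
  -- 'for x, y in to_move': the replayed writes touch pairwise distinct cells, so the result
  -- does not depend on the set's iteration order; the port iterates in insertion order.
  let new_board := to_move.foldl pvUpd new_board
  (new_board, has_moved)

-- ===== PORT B =====
def move_south_alt (board : List (List String)) (has_moved_east : Bool) : List (List String) × Bool :=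
  let n : Int := (board.length : Int)
  let r := (PySem.List.enumerate board).foldl (fun (st : List (List String) × Bool) p =>
      let above := PySem.List.pyGetD board (p.1 - 1) []
      let below := PySem.List.pyGetD board (PySem.Int.mod (p.1 + 1) n) []
      let inner := (PySem.List.enumerate p.2).foldl (fun (st2 : List String × Bool) q =>
          if (q.2 == "v") && (PySem.List.pyGetD below q.1 "" == ".") then (st2.1 ++ ["."], true)
          else if (q.2 == ".") && (PySem.List.pyGetD above q.1 "" == "v") then (st2.1 ++ ["v"], st2.2)
          else (st2.1 ++ [q.2], st2.2)) ([], st.2)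
      (st.1 ++ [inner.1], inner.2)) ([], false)
  (r.1, r.2 || has_moved_east)

-- ===== PRECONDITION & SPEC =====
-- Pre_ excludes ragged boards: on a row shorter than the first A raises IndexError, and on a
-- row longer than the first A's leaving cells beyond column len(board[0]) untouched is an
-- artefact of taking the first row's length as the grid width; B is written for grids.
def Pre_move_south (board : List (List String)) (has_moved_east : Bool) : Prop :=
  ∀ row ∈ board, row.length = (board.headD []).length
instance (board : List (List String)) (has_moved_east : Bool) : Decidable (Pre_move_south board has_moved_east) := by
  unfold Pre_move_south; infer_instance

def pvWitness_move_south : List (List String) × Bool := ([["v", "."], [".", "v"], [".", "."]], false)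

def Spec_move_south (board : List (List String)) (has_moved_east : Bool) (out : List (List String) × Bool) : Prop := out = move_south_alt board has_moved_east
instance (board : List (List String)) (has_moved_east : Bool) (out : List (List String) × Bool) : Decidable (Spec_move_south board has_moved_east out) := by unfold Spec_move_south; infer_instance

-- ===== CLAIM (what is proved, stated in full; the proofs are below) =====
def Claim_equal_move_south : Prop := ∀ (board : List (List String)) (has_moved_east : Bool), Dom_move_south board has_moved_east → Pre_move_south board has_moved_east → Spec_move_south board has_moved_east (move_south board has_moved_east)

-- ===== LEMMAS AND PROOFS =====

-- Nat-level cell access, A's move-set, and the canonical one-step result both ports reach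
def gB (b : List (List String)) (i j : Nat) : String := (b.getD i []).getD j ""

def srcN (b : List (List String)) (i j : Nat) : Bool :=
  (gB b i j == "v") && (gB b ((i + 1) % b.length) j == ".")

def natML (b : List (List String)) : List (Nat × Nat) :=
  (List.range b.length).flatMap (fun i =>
    ((List.range (b.headD []).length).filter (fun j => srcN b i j)).map (fun j => (i, j)))

def prevN (N i : Nat) : Nat := (i + N - 1) % N

def outCell (b : List (List String)) (i j : Nat) : String :=
  if srcN b i j then "."
  else if (gB b i j == ".") && (gB b (prevN b.length i) j == "v") then "v"
  else gB b i j

def canonB (b : List (List String)) : List (List String) :=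
  (List.range b.length).map (fun i => (List.range (b.headD []).length).map (fun j => outCell b i j))

def anySrc (b : List (List String)) : Bool :=
  (List.range b.length).any (fun i => (List.range (b.headD []).length).any (fun j => srcN b i j))

theorem pvIdx_cast (b : List (List String)) (i j : Nat) : pvIdx b (i : Int) (j : Int) = gB b i j := by
  simp [pvIdx, gB, PySem.List.pyGetD_natCast]

theorem mod_succ_cast (i N : Nat) (h : 0 < N) :
    PySem.Int.mod ((i : Int) + 1) (N : Int) = (((i + 1) % N : Nat) : Int) := by
  rw [PySem.Int.mod_eq_emod_of_pos (by exact_mod_cast h)]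
  push_cast
  ring

theorem mod_succ_eq (x N : Nat) (h : x < N) : (x + 1) % N = if x + 1 = N then 0 else x + 1 := by
  by_cases h1 : x + 1 = N
  · rw [if_pos h1, h1, Nat.mod_self]
  · rw [if_neg h1]; exact Nat.mod_eq_of_lt (by omega)

theorem prevN_lt (N i : Nat) (h : 0 < N) : prevN N i < N := by
  exact Nat.mod_lt _ h

theorem prevN_eq (N i : Nat) (h : i < N) : prevN N i = if i = 0 then N - 1 else i - 1 := by
  unfold prevN
  split
  · subst ‹i = 0›; simp
  · have h2 : i + N - 1 = (i - 1) + N := by omega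
    rw [h2, Nat.add_mod_right]
    exact Nat.mod_eq_of_lt (by omega)

theorem prevN_succ (N i : Nat) (h : i < N) : (prevN N i + 1) % N = i := by
  rw [prevN_eq N i h]
  split
  · subst ‹i = 0›
    have : N - 1 + 1 = N := by omega
    rw [this, Nat.mod_self]
  · have : i - 1 + 1 = i := by omega
    rw [this]; exact Nat.mod_eq_of_lt h

theorem succ_mod_inj (N x i : Nat) (hx : x < N) (hi : i < N) (h : (x + 1) % N = i) : x = prevN N i := by
  rw [mod_succ_eq x N hx] at h
  rw [prevN_eq N i hi]
  split at h <;> split <;> omega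

theorem pvSrc_cast (b : List (List String)) (i j : Nat) (h : 0 < b.length) :
    pvSrc b (b.length : Int) (i : Int) (j : Int) = srcN b i j := by
  simp only [pvSrc, srcN, mod_succ_cast i b.length h, pvIdx_cast]

theorem mem_natML (b : List (List String)) (p : Nat × Nat) :
    p ∈ natML b ↔ p.1 < b.length ∧ p.2 < (b.headD []).length ∧ srcN b p.1 p.2 := by
  rcases p with ⟨x, y⟩
  simp only [natML, List.mem_flatMap, List.mem_map, List.mem_filter, List.mem_range]
  constructor
  · rintro ⟨i, hi, j, ⟨⟨hj, hs⟩, hp⟩⟩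
    cases hp
    exact ⟨hi, hj, hs⟩
  · rintro ⟨hx, hy, hs⟩
    exact ⟨x, hx, y, ⟨⟨hy, hs⟩, rfl⟩⟩

theorem natML_nodup (b : List (List String)) : (natML b).Nodup := by
  unfold natML
  have : ∀ li : List Nat, li.Nodup →
      (li.flatMap (fun i =>
        ((List.range (b.headD []).length).filter (fun j => srcN b i j)).map (fun j => (i, j)))).Nodup := by
    intro li
    induction li with
    | nil => intro _; simp
    | cons i li ih =>
      intro hnd
      rw [List.flatMap_cons]
      apply List.Nodup.append
      · exact List.Nodup.map (fun a b h => by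
            have := congrArg Prod.snd h; simpa using this)
          (List.Nodup.filter _ List.nodup_range)
      · exact ih hnd.of_cons
      · intro p hp hq
        simp only [List.mem_map, List.mem_filter] at hp
        simp only [List.mem_flatMap, List.mem_map, List.mem_filter] at hq
        rcases hp with ⟨j, _, rfl⟩
        rcases hq with ⟨i', hi', j', _, hpq⟩
        have : i' = i := by
          have := congrArg Prod.fst hpq; simpa using this
        subst this
        exact (List.nodup_cons.mp hnd).1 hi'
  exact this _ List.nodup_range

theorem foldl_add_if_inner (c : Int → Bool) (i : Int) :
    ∀ (lj : List Int) (s : PySem.Set (Int × Int)), lj.Nodup → (∀ j ∈ lj, (i, j) ∉ s) →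
      lj.foldl (fun s j => if c j then PySem.Set.add s (i, j) else s) s
        = s ++ (lj.filter c).map (fun j => (i, j)) := by
  intro lj
  induction lj with
  | nil => intro s _ _; simp
  | cons j lj ih =>
    intro s hnd hfresh
    simp only [List.foldl_cons]
    by_cases hc : c j
    · rw [if_pos hc, PySem.Set.add_of_not_mem (hfresh j (by simp))]
      rw [ih (s ++ [(i, j)]) hnd.of_cons ?_]
      · simp [hc]
      · intro j' hj'
        simp only [List.mem_append, List.mem_singleton]
        rintro (h | h)
        · exact hfresh j' (by simp [hj']) h
        · have : j' = j := by simpa using congrArg Prod.snd h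
          exact (List.nodup_cons.mp hnd).1 (this ▸ hj')
    · rw [if_neg hc, ih s hnd.of_cons (fun j' hj' => hfresh j' (by simp [hj']))]
      simp [hc]

theorem foldl_add_if_outer (c : Int → Int → Bool) (lj : List Int) (hlj : lj.Nodup) :
    ∀ (li : List Int), li.Nodup → ∀ (s : PySem.Set (Int × Int)), (∀ p ∈ s, p.1 ∉ li) →
      li.foldl (fun s i => lj.foldl (fun s j => if c i j then PySem.Set.add s (i, j) else s) s) s
        = s ++ li.flatMap (fun i => (lj.filter (c i)).map (fun j => (i, j))) := by
  intro li
  induction li with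
  | nil => intro _ s _; simp
  | cons i li ih =>
    intro hnd s hfresh
    simp only [List.foldl_cons]
    rw [foldl_add_if_inner (c i) i lj s hlj
      (fun j hj hmem => hfresh _ hmem (by simp))]
    rw [ih hnd.of_cons _ ?_]
    · simp [List.flatMap_cons]
    · intro p hp
      rcases List.mem_append.mp hp with h | h
      · have := hfresh p h
        simp only [List.mem_cons, not_or] at this
        exact this.2
      · simp only [List.mem_map, List.mem_filter] at h
        rcases h with ⟨j, _, rfl⟩
        exact (List.nodup_cons.mp hnd).1

theorem to_move_eq (b : List (List String)) :
    ((PySem.List.pyRange 0 (b.length : Int) 1).foldl (fun s i =>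
        (PySem.List.pyRange 0 ((b.headD []).length : Int) 1).foldl (fun s j =>
          if pvSrc b (b.length : Int) i j then PySem.Set.add s (i, j) else s) s)
      (PySem.Set.empty : PySem.Set (Int × Int)))
      = (natML b).map (fun p => ((p.1 : Int), (p.2 : Int))) := by
  rw [foldl_add_if_outer (fun i j => pvSrc b (b.length : Int) i j) _
    (PySem.List.nodup_pyRange_one 0 ((b.headD []).length : Int)) _
    (PySem.List.nodup_pyRange_one 0 (b.length : Int)) PySem.Set.empty
    (by intro p hp; simp [PySem.Set.empty] at hp)]
  rcases Nat.eq_zero_or_pos b.length with h0 | h0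
  · simp [natML, h0, PySem.List.pyRange_zero_natCast]
  · rw [PySem.List.pyRange_zero_natCast b.length, PySem.List.pyRange_zero_natCast (b.headD []).length]
    simp only [List.flatMap_map]
    unfold natML
    rw [List.map_flatMap, show (PySem.Set.empty : PySem.Set (Int × Int)) = [] from rfl, List.nil_append]
    apply List.flatMap_congr
    intro x _
    rw [List.filter_map, List.map_map, List.map_map]
    congr 1
    · apply List.filter_congr
      intro j _
      simp only [Function.comp_apply]
      exact pvSrc_cast b x j h0

theorem getD_set_row (r : List String) (y : Nat) (v : String) (hy : y < r.length) (j : Nat) :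
    (r.set y v).getD j "" = if j = y then v else r.getD j "" := by
  rw [List.getD_eq_getElem?_getD, List.getD_eq_getElem?_getD, List.getElem?_set]
  by_cases hjy : j = y
  · subst hjy; simp [hy]
  · rw [if_neg (fun h => hjy h.symm), if_neg hjy]

theorem getD_set_outer (b : List (List String)) (k : Nat) (r : List String) (hk : k < b.length) (i : Nat) :
    (b.set k r).getD i [] = if i = k then r else b.getD i [] := by
  rw [List.getD_eq_getElem?_getD, List.getD_eq_getElem?_getD, List.getElem?_set]
  by_cases hik : i = k
  · subst hik; simp [hk]
  · rw [if_neg (fun h => hik h.symm), if_neg hik]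

theorem pvUpd_eq (b : List (List String)) (x y : Nat) (h0 : 0 < b.length) :
    pvUpd b ((x : Int), (y : Int)) =
      (b.set x ((b.getD x []).set y ".")).set ((x + 1) % b.length)
        (((b.set x ((b.getD x []).set y ".")).getD ((x + 1) % b.length) []).set y "v") := by
  unfold pvUpd
  simp only [PySem.List.pySetD_natCast, PySem.List.pyGetD_natCast, List.length_set]
  rw [mod_succ_cast x b.length h0]
  simp only [PySem.List.pySetD_natCast, PySem.List.pyGetD_natCast]

theorem length_pvUpd (b : List (List String)) (p : Int × Int) : (pvUpd b p).length = b.length := by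
  simp [pvUpd, PySem.List.length_pySetD]

theorem shape_pvUpd (b : List (List String)) (x y : Nat) (hx : x < b.length) (i : Nat) :
    ((pvUpd b ((x : Int), (y : Int))).getD i []).length = (b.getD i []).length := by
  have h0 : 0 < b.length := by omega
  have ht : (x + 1) % b.length < b.length := Nat.mod_lt _ h0
  rw [pvUpd_eq b x y h0,
    getD_set_outer _ _ _ (show (x + 1) % b.length < (b.set x ((b.getD x []).set y ".")).length by
      simpa using ht) i]
  by_cases hit : i = (x + 1) % b.length
  · rw [if_pos hit, hit, List.length_set, getD_set_outer _ _ _ hx]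
    split_ifs with h
    · rw [h, List.length_set]
    · rfl
  · rw [if_neg hit, getD_set_outer _ _ _ hx i]
    split_ifs with h
    · rw [h, List.length_set]
    · rfl

theorem g_pvUpd (b : List (List String)) (x y : Nat) (hx : x < b.length)
    (hne : (x + 1) % b.length ≠ x)
    (hy1 : y < (b.getD x []).length) (hy2 : y < (b.getD ((x + 1) % b.length) []).length)
    (i j : Nat) :
    gB (pvUpd b ((x : Int), (y : Int))) i j =
      if i = x ∧ j = y then "."
      else if i = (x + 1) % b.length ∧ j = y then "v"
      else gB b i j := by
  have h0 : 0 < b.length := by omega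
  have ht : (x + 1) % b.length < b.length := Nat.mod_lt _ h0
  unfold gB
  rw [pvUpd_eq b x y h0,
    getD_set_outer _ _ _ (show (x + 1) % b.length < (b.set x ((b.getD x []).set y ".")).length by
      simpa using ht) i]
  by_cases hit : i = (x + 1) % b.length
  · rw [if_pos hit]
    rw [getD_set_outer _ _ _ hx ((x + 1) % b.length), if_neg (fun h => hne h)]
    rw [getD_set_row _ y "v" hy2 j]
    by_cases hjy : j = y
    · rw [if_pos hjy, if_neg (fun hcon => hne (by rw [← hit]; exact hcon.1)), if_pos ⟨hit, hjy⟩]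
    · rw [if_neg hjy, if_neg (fun hcon => hjy hcon.2), if_neg (fun hcon => hjy hcon.2), hit]
  · rw [if_neg hit]
    rw [getD_set_outer _ _ _ hx i]
    by_cases hix : i = x
    · rw [if_pos hix]
      rw [getD_set_row _ y "." hy1 j]
      by_cases hjy : j = y
      · rw [if_pos hjy, if_pos ⟨hix, hjy⟩]
      · rw [if_neg hjy, if_neg (by rintro ⟨_, h⟩; exact hjy h),
          if_neg (by rintro ⟨_, h⟩; exact hjy h), hix]
    · rw [if_neg hix, if_neg (by rintro ⟨h, _⟩; exact hix h),
        if_neg (by rintro ⟨h, _⟩; exact hit h)]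

theorem g_foldl_pvUpd :
    ∀ (L : List (Nat × Nat)) (b : List (List String)),
      (∀ p ∈ L, p.1 < b.length) →
      (∀ p ∈ L, p.2 < (b.getD p.1 []).length) →
      (∀ p ∈ L, p.2 < (b.getD ((p.1 + 1) % b.length) []).length) →
      (∀ p ∈ L, (p.1 + 1) % b.length ≠ p.1) →
      L.Nodup →
      (∀ p ∈ L, ∀ q ∈ L, ((p.1 + 1) % b.length = (q.1 + 1) % b.length ∧ p.2 = q.2) → p = q) →
      (∀ p ∈ L, ∀ q ∈ L, ¬((p.1 + 1) % b.length = q.1 ∧ p.2 = q.2)) →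
      ∀ i j : Nat,
        gB (L.foldl (fun b p => pvUpd b ((p.1 : Int), (p.2 : Int))) b) i j =
          if (i, j) ∈ L then "."
          else if ∃ p ∈ L, (p.1 + 1) % b.length = i ∧ p.2 = j then "v"
          else gB b i j := by
  intro L
  induction L with
  | nil => intro b _ _ _ _ _ _ _ i j; simp
  | cons p L ih =>
    intro b h1 h2 h3 h4 h5 h6 h7 i j
    obtain ⟨x, y⟩ := p
    have hx : x < b.length := h1 (x, y) (by simp)
    have hy1 : y < (b.getD x []).length := h2 (x, y) (by simp)
    have hy2 : y < (b.getD ((x + 1) % b.length) []).length := h3 (x, y) (by simp)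
    have hne : (x + 1) % b.length ≠ x := h4 (x, y) (by simp)
    have hlen : (pvUpd b ((x : Int), (y : Int))).length = b.length := length_pvUpd b _
    have hshape : ∀ k, ((pvUpd b ((x : Int), (y : Int))).getD k []).length = (b.getD k []).length :=
      shape_pvUpd b x y hx
    simp only [List.foldl_cons]
    rw [ih (pvUpd b ((x : Int), (y : Int)))
      (fun q hq => by rw [hlen]; exact h1 q (by simp [hq]))
      (fun q hq => by rw [hshape]; exact h2 q (by simp [hq]))
      (fun q hq => by rw [hshape, hlen]; exact h3 q (by simp [hq]))
      (fun q hq => by rw [hlen]; exact h4 q (by simp [hq]))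
      h5.of_cons
      (fun q hq r hr h => by rw [hlen] at h; exact h6 q (by simp [hq]) r (by simp [hr]) h)
      (fun q hq r hr h => by rw [hlen] at h; exact h7 q (by simp [hq]) r (by simp [hr]) h)
      i j]
    simp only [hlen]
    rw [g_pvUpd b x y hx hne hy1 hy2 i j]
    by_cases hmem : (i, j) ∈ L
    · rw [if_pos hmem, if_pos (List.mem_cons_of_mem _ hmem)]
    · rw [if_neg hmem]
      by_cases htgt : ∃ q ∈ L, (q.1 + 1) % b.length = i ∧ q.2 = j
      · rw [if_pos htgt]
        have hni : (i, j) ∉ (x, y) :: L := by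
          intro hc
          rcases List.mem_cons.mp hc with hc | hc
          · rcases htgt with ⟨q, hq, hq1, hq2⟩
            exact h7 q (List.mem_cons_of_mem _ hq) (x, y) (List.mem_cons_self)
              ⟨by rw [hq1]; exact (congrArg Prod.fst hc), by rw [hq2]; exact (congrArg Prod.snd hc)⟩
          · exact hmem hc
        rw [if_neg hni, if_pos (by rcases htgt with ⟨q, hq, hq'⟩; exact ⟨q, List.mem_cons_of_mem _ hq, hq'⟩)]
      · rw [if_neg htgt]
        by_cases hpx : i = x ∧ j = y
        · rw [if_pos hpx, if_pos (by rcases hpx with ⟨hpx1, hpx2⟩; subst hpx1; subst hpx2; exact List.mem_cons_self)]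
        · rw [if_neg hpx]
          by_cases hpt : i = (x + 1) % b.length ∧ j = y
          · rw [if_pos hpt,
              if_neg (by
                intro hc
                rcases List.mem_cons.mp hc with hc | hc
                · exact hne (by
                    have h1c := congrArg Prod.fst hc
                    have h2c := congrArg Prod.snd hc
                    simp at h1c
                    rw [← hpt.1, h1c])
                · exact hmem hc),
              if_pos ⟨(x, y), List.mem_cons_self, hpt.1.symm, hpt.2.symm⟩]
          · rw [if_neg hpt,
              if_neg (by
                intro hc
                rcases List.mem_cons.mp hc with hc | hc
                · exact hpx ⟨congrArg Prod.fst hc, congrArg Prod.snd hc⟩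
                · exact hmem hc),
              if_neg (by
                rintro ⟨q, hq, hq1, hq2⟩
                rcases List.mem_cons.mp hq with hq | hq
                · exact hpt ⟨by rw [← hq1, hq], by rw [← hq2, hq]⟩
                · exact htgt ⟨q, hq, hq1, hq2⟩)]

theorem length_foldl_pvUpd :
    ∀ (L : List (Nat × Nat)) (b : List (List String)),
      (L.foldl (fun b p => pvUpd b ((p.1 : Int), (p.2 : Int))) b).length = b.length := by
  intro L
  induction L with
  | nil => intro b; rfl
  | cons p L ih => intro b; rw [List.foldl_cons, ih, length_pvUpd]

theorem shape_foldl_pvUpd :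
    ∀ (L : List (Nat × Nat)) (b : List (List String)), (∀ p ∈ L, p.1 < b.length) → ∀ k : Nat,
      ((L.foldl (fun b p => pvUpd b ((p.1 : Int), (p.2 : Int))) b).getD k []).length = (b.getD k []).length := by
  intro L
  induction L with
  | nil => intro b _ k; rfl
  | cons p L ih =>
    intro b h k
    rw [List.foldl_cons, ih _ (fun q hq => by
      rw [length_pvUpd]; exact h q (List.mem_cons_of_mem _ hq)), shape_pvUpd b p.1 p.2 (h p List.mem_cons_self)]

-- generic shape of B's two folds: append one element, OR one flag
theorem foldl_push_or {α β : Type} (g : α → β) (h : α → Bool) :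
    ∀ (l : List α) (acc : List β) (flag : Bool),
      l.foldl (fun st q => (st.1 ++ [g q], st.2 || h q)) (acc, flag) = (acc ++ l.map g, flag || l.any h) := by
  intro l
  induction l with
  | nil => intro acc flag; simp
  | cons a l ih =>
    intro acc flag
    simp only [List.foldl_cons, List.map_cons, List.any_cons]
    rw [ih]
    simp [Bool.or_assoc]

-- A's result, in canonical form
theorem A_char (board : List (List String)) (e : Bool)
    (hpre : ∀ row ∈ board, row.length = (board.headD []).length) (hne : board ≠ []) :
    move_south board e = (canonB board, anySrc board || e) := by
  have hN : 0 < board.length := List.length_pos_of_ne_nil hne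
  simp only [move_south, to_move_eq board, List.foldl_map, List.map_id']
  have hm := fun p hp => (mem_natML board p).mp hp
  have hsrc : ∀ p ∈ natML board,
      gB board p.1 p.2 = "v" ∧ gB board ((p.1 + 1) % board.length) p.2 = "." := by
    intro p hp
    have := (hm p hp).2.2
    simp only [srcN, Bool.and_eq_true, beq_iff_eq] at this
    exact this
  have h1 : ∀ p ∈ natML board, p.1 < board.length := fun p hp => (hm p hp).1
  have hrow : ∀ k : Nat, k < board.length → (board.getD k []).length = (board.headD []).length := by
    intro k hk
    rw [List.getD_eq_getElem board [] hk]
    exact hpre _ (List.getElem_mem hk)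
  have h2 : ∀ p ∈ natML board, p.2 < (board.getD p.1 []).length := by
    intro p hp
    rw [hrow p.1 (h1 p hp)]; exact (hm p hp).2.1
  have h3 : ∀ p ∈ natML board, p.2 < (board.getD ((p.1 + 1) % board.length) []).length := by
    intro p hp
    rw [hrow _ (Nat.mod_lt _ hN)]; exact (hm p hp).2.1
  have h4 : ∀ p ∈ natML board, (p.1 + 1) % board.length ≠ p.1 := by
    intro p hp hc
    have hs := hsrc p hp
    rw [hc, hs.1] at hs
    exact absurd hs.2 (by decide)
  have h6 : ∀ p ∈ natML board, ∀ q ∈ natML board,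
      ((p.1 + 1) % board.length = (q.1 + 1) % board.length ∧ p.2 = q.2) → p = q := by
    intro p hp q hq ⟨hc1, hc2⟩
    have hp1 := h1 p hp
    have hq1 := h1 q hq
    rw [mod_succ_eq _ _ hp1, mod_succ_eq _ _ hq1] at hc1
    have : p.1 = q.1 := by split_ifs at hc1 <;> omega
    exact Prod.ext this hc2
  have h7 : ∀ p ∈ natML board, ∀ q ∈ natML board,
      ¬((p.1 + 1) % board.length = q.1 ∧ p.2 = q.2) := by
    rintro p hp q hq ⟨hc1, hc2⟩
    have hsp := (hsrc p hp).2
    have hsq := (hsrc q hq).1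
    rw [hc1, hc2, hsq] at hsp
    exact absurd hsp (by decide)
  simp only [Prod.mk.injEq]
  constructor
  · -- the boards agree
    apply List.ext_getElem
    · rw [length_foldl_pvUpd]
      simp [canonB]
    · intro i hi1 hi2
      have hib : i < board.length := by rwa [length_foldl_pvUpd] at hi1
      simp only [canonB, List.getElem_map, List.getElem_range]
      apply List.ext_getElem
      · rw [← List.getD_eq_getElem _ [] hi1]
        rw [shape_foldl_pvUpd (natML board) board h1 i, hrow i hib]
        simp
      · intro j hj1 hj2
        have hjW : j < (board.headD []).length := by simpa using hj2
        have hLHS : (List.foldl (fun x y => pvUpd x ((y.1 : Int), (y.2 : Int))) board (natML board))[i][j]'hj1 =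
            gB (List.foldl (fun x y => pvUpd x ((y.1 : Int), (y.2 : Int))) board (natML board)) i j := by
          unfold gB
          rw [List.getD_eq_getElem _ [] hi1, List.getD_eq_getElem _ "" hj1]
        rw [hLHS, g_foldl_pvUpd (natML board) board h1 h2 h3 h4 (natML_nodup board) h6 h7 i j]
        simp only [List.getElem_map, List.getElem_range]
        unfold outCell
        have hmemiff : ((i, j) ∈ natML board) ↔ srcN board i j = true := by
          rw [mem_natML]
          exact ⟨fun h => h.2.2, fun h => ⟨hib, hjW, h⟩⟩
        have htgtiff : (∃ p ∈ natML board, (p.1 + 1) % board.length = i ∧ p.2 = j) ↔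
            srcN board (prevN board.length i) j = true := by
          constructor
          · rintro ⟨p, hp, hp1, hp2⟩
            have hpe := succ_mod_inj board.length p.1 i (h1 p hp) hib hp1
            rw [← hpe, ← hp2]
            exact (hm p hp).2.2
          · intro hs
            exact ⟨(prevN board.length i, j),
              (mem_natML board _).mpr ⟨prevN_lt _ _ hN, hjW, hs⟩, prevN_succ _ _ hib, rfl⟩
        by_cases hs1 : srcN board i j = true
        · rw [if_pos (hmemiff.mpr hs1), if_pos hs1]
        · rw [if_neg (fun h => hs1 (hmemiff.mp h)), if_neg hs1]
          by_cases hs2 : srcN board (prevN board.length i) j = true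
          · have hbs : ((gB board i j == ".") && (gB board (prevN board.length i) j == "v")) = true := by
              have hx2 := hs2
              simp only [srcN, prevN_succ _ _ hib, Bool.and_eq_true, beq_iff_eq] at hx2
              simp only [Bool.and_eq_true, beq_iff_eq]
              exact ⟨hx2.2, hx2.1⟩
            rw [if_pos (htgtiff.mpr hs2), if_pos hbs]
          · have hbs : ¬ ((gB board i j == ".") && (gB board (prevN board.length i) j == "v")) = true := by
              intro hcon
              apply hs2
              simp only [Bool.and_eq_true, beq_iff_eq] at hcon
              simp only [srcN, prevN_succ _ _ hib, Bool.and_eq_true, beq_iff_eq]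
              exact ⟨hcon.2, hcon.1⟩
            rw [if_neg (fun h => hs2 (htgtiff.mp h)), if_neg hbs]
  · -- the flags agree
    unfold anySrc
    by_cases hex : ∃ p, p ∈ natML board
    · rcases hex with ⟨p, hp⟩
      obtain ⟨hpi, hpj, hps⟩ := hm p hp
      rw [if_pos (by simpa using List.length_pos_of_mem hp)]
      have hany : ((List.range board.length).any fun k =>
          (List.range (board.headD []).length).any fun j => srcN board k j) = true :=
        List.any_eq_true.mpr ⟨p.1, List.mem_range.mpr hpi,
          List.any_eq_true.mpr ⟨p.2, List.mem_range.mpr hpj, hps⟩⟩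
      rw [hany]
    · have hnil2 : natML board = [] :=
        List.eq_nil_iff_forall_not_mem.mpr (fun x hx => hex ⟨x, hx⟩)
      have hany : ¬ ((List.range board.length).any fun k =>
          (List.range (board.headD []).length).any fun j => srcN board k j) = true := by
        rw [List.any_eq_true]
        rintro ⟨k, hk, hin⟩
        rw [List.any_eq_true] at hin
        rcases hin with ⟨j, hj, hsrcj⟩
        exact hex ⟨(k, j), (mem_natML board (k, j)).mpr
          ⟨List.mem_range.mp hk, List.mem_range.mp hj, hsrcj⟩⟩
      rw [Bool.not_eq_true] at hany
      rw [hnil2, if_neg (by simp), hany, Bool.false_or]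

theorem pyGetD_prev (b : List (List String)) (i : Nat) (hi : i < b.length) (hne : b ≠ []) :
    PySem.List.pyGetD b ((i : Int) - 1) [] = b.getD (prevN b.length i) [] := by
  cases i with
  | zero =>
    rw [show ((0 : Nat) : Int) - 1 = (-1 : Int) by norm_num,
      PySem.List.pyGetD_neg_one b [] hne, prevN_eq b.length 0 hi, if_pos rfl,
      List.getLast_eq_getElem, List.getD_eq_getElem b []
        (by have := List.length_pos_of_ne_nil hne; omega)]
  | succ k =>
    rw [show ((k + 1 : Nat) : Int) - 1 = ((k : Nat) : Int) by push_cast; ring,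
      PySem.List.pyGetD_natCast, prevN_eq b.length (k + 1) hi, if_neg (by omega)]
    simp

theorem inner_fold (above below row : List String) (fl : Bool) :
    (PySem.List.enumerate row).foldl (fun (st2 : List String × Bool) q =>
        if (q.2 == "v") && (PySem.List.pyGetD below q.1 "" == ".") then (st2.1 ++ ["."], true)
        else if (q.2 == ".") && (PySem.List.pyGetD above q.1 "" == "v") then (st2.1 ++ ["v"], st2.2)
        else (st2.1 ++ [q.2], st2.2)) ([], fl)
      = ((PySem.List.enumerate row).map (fun q =>
            if (q.2 == "v") && (PySem.List.pyGetD below q.1 "" == ".") then "."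
            else if (q.2 == ".") && (PySem.List.pyGetD above q.1 "" == "v") then "v"
            else q.2),
         fl || (PySem.List.enumerate row).any (fun q =>
            (q.2 == "v") && (PySem.List.pyGetD below q.1 "" == "."))) := by
  have hstep : (fun (st2 : List String × Bool) (q : Int × String) =>
        if (q.2 == "v") && (PySem.List.pyGetD below q.1 "" == ".") then (st2.1 ++ ["."], true)
        else if (q.2 == ".") && (PySem.List.pyGetD above q.1 "" == "v") then (st2.1 ++ ["v"], st2.2)
        else (st2.1 ++ [q.2], st2.2))
      = (fun st2 q =>
        (st2.1 ++ [if (q.2 == "v") && (PySem.List.pyGetD below q.1 "" == ".") then "."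
            else if (q.2 == ".") && (PySem.List.pyGetD above q.1 "" == "v") then "v"
            else q.2],
         st2.2 || ((q.2 == "v") && (PySem.List.pyGetD below q.1 "" == ".")))) := by
    funext st2 q
    split_ifs <;> simp_all
  rw [hstep, foldl_push_or]
  simp

theorem B_char (board : List (List String)) (e : Bool)
    (hpre : ∀ row ∈ board, row.length = (board.headD []).length) (hne : board ≠ []) :
    move_south_alt board e = (canonB board, anySrc board || e) := by
  have hN : 0 < board.length := List.length_pos_of_ne_nil hne
  have hrow : ∀ k : Nat, k < board.length → (board.getD k []).length = (board.headD []).length := by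
    intro k hk
    rw [List.getD_eq_getElem board [] hk]
    exact hpre _ (List.getElem_mem hk)
  -- neighbour rows, as Nat-level accesses
  have hbelow : ∀ i : Nat, i < board.length →
      PySem.List.pyGetD board (PySem.Int.mod ((i : Int) + 1) (board.length : Int)) []
        = board.getD ((i + 1) % board.length) [] := by
    intro i hi
    rw [mod_succ_cast i board.length hN, PySem.List.pyGetD_natCast]
  have habove : ∀ i : Nat, i < board.length →
      PySem.List.pyGetD board ((i : Int) - 1) [] = board.getD (prevN board.length i) [] :=
    fun i hi => pyGetD_prev board i hi hne
  simp only [move_south_alt, inner_fold, foldl_push_or, List.nil_append, Bool.false_or]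
  simp only [Prod.mk.injEq]
  constructor
  · -- the boards agree
    apply List.ext_getElem
    · simp [canonB]
    · intro i hi1 hi2
      have hib : i < board.length := by simpa using hi1
      simp only [canonB, List.getElem_map, PySem.List.getElem_enumerate, List.getElem_range]
      simp only [zero_add]
      rw [hbelow i hib, habove i hib]
      apply List.ext_getElem
      · have := hrow i hib
        rw [List.getD_eq_getElem board [] hib] at this
        simp [this]
      · intro j hj1 hj2
        have hjW : j < (board.headD []).length := by simpa using hj2
        have hjr : j < board[i].length := by simpa using hj1
        simp only [List.getElem_map, PySem.List.getElem_enumerate, List.getElem_range,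
          zero_add, PySem.List.pyGetD_natCast]
        have e1 : board[i][j]'hjr = gB board i j := by
          unfold gB
          rw [List.getD_eq_getElem board [] hib, List.getD_eq_getElem _ "" hjr]
        have e2 : (board.getD ((i + 1) % board.length) []).getD (j : Nat) "" = gB board ((i + 1) % board.length) j := rfl
        have e3 : (board.getD (prevN board.length i) []).getD (j : Nat) "" = gB board (prevN board.length i) j := rfl
        rw [e1, e2, e3]
        unfold outCell srcN
        rfl
  · -- the flags agree
    congr 1
    rw [Bool.eq_iff_iff]
    simp only [List.any_eq_true, PySem.List.mem_enumerate_iff, anySrc, List.mem_range, zero_add]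
    constructor
    · rintro ⟨p, ⟨k, hk, rfl⟩, hp⟩
      simp only [zero_add] at hp
      rw [hbelow k hk] at hp
      rcases hp with ⟨q, ⟨j, hj, rfl⟩, hqq⟩
      simp only [PySem.List.pyGetD_natCast] at hqq
      have hjW : j < (board.headD []).length := by
        rw [← hrow k hk, List.getD_eq_getElem board [] hk]; exact hj
      refine ⟨k, hk, j, hjW, ?_⟩
      unfold srcN gB
      rw [List.getD_eq_getElem board [] hk, List.getD_eq_getElem _ "" hj]
      exact hqq
    · rintro ⟨k, hk, j, hj, hs⟩
      have hjr : j < board[k].length := by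
        rw [← List.getD_eq_getElem board [] hk, hrow k hk]; exact hj
      refine ⟨((k : Int), board[k]), ⟨k, hk, by simp⟩,
        ((j : Int), board[k][j]'hjr), ⟨j, hjr, by simp⟩, ?_⟩
      simp only [hbelow k hk, PySem.List.pyGetD_natCast]
      unfold srcN gB at hs
      rw [List.getD_eq_getElem board [] hk, List.getD_eq_getElem _ "" hjr] at hs
      exact hs

-- ===== VERDICT (by name: the statement is the Claim_ definition above) =====
set_option maxRecDepth 8192 in
theorem move_south_spec : Claim_equal_move_south := by
  intro board hme _hdom hpre
  unfold Spec_move_south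
  rcases eq_or_ne board [] with hnil | hne
  · subst hnil; cases hme <;> rfl
  · rw [A_char board hme hpre hne, B_char board hme hpre hne]
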